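-- pv_equiv track=rewrite | github.com/rm-3284/CLT_output_language_features | src/data/generic_sentences/dataset_prepare.py | chinese_sentence_clean
-- ===== SOURCE A (Python) =====
-- def is_english_alphabet_char(char: str) -> bool:
--     if len(char) > 1:
--         raise AssertionError('Argument should be one character')
--     return ('a' <= char <= 'z' or 'A' <= char <= 'Z')
--
-- def chinese_sentence_clean(sentence: str) -> str:
--     words = sentence.split(" ")
--     modified_words = []
--     before_eng_alphabet = False
--     for word in words:
--         if word[0] == ',' or word[0] == "'" or word[0] == '?' or word[0] == '.':
--             modified_words.append(word)
--         elif before_eng_alphabet or is_english_alphabet_char(word[0]):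
--             modified_words.append(' ' + word)
--         else:
--             modified_words.append(word)
--         before_eng_alphabet = is_english_alphabet_char(word[-1])
--
--     result = "".join(modified_words)
--     if result[0] == ' ':
--         result = result[1:]
--
--     return result
-- ===== SOURCE B (Python) =====
-- def chinese_sentence_clean(sentence: str) -> str:
--     # Character-level filter: no word split/join/strip. Each space of the sentence
--     # is kept or dropped based only on its neighbouring characters.
--     def is_eng(c):
--         return 'a' <= c <= 'z' or 'A' <= c <= 'Z'
--     out = []
--     prev = ''
--     for i, c in enumerate(sentence):
--         if c != ' ':
--             out.append(c)
--         else: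
--             nxt = sentence[i + 1] if i + 1 < len(sentence) else ''
--             if nxt and nxt not in ",'?." and (is_eng(prev) or is_eng(nxt)):
--                 out.append(c)
--         prev = c
--     return ''.join(out)
-- ===== Notes on version B (the rewrite author's own statement) =====
-- stated objective: alternative
-- what changed: B never splits into words: instead of A's split/rebuild-word-list/join/strip-leading-space pipeline with a threaded before_eng_alphabet flag, B does one character-level pass over the sentence that copies every non-space character and keeps or drops each space by looking only at its two neighbouring characters.
-- outside the precondition, e.g. on chinese_sentence_clean(' '): A raises IndexError, B returns ''
import Mathlib
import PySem

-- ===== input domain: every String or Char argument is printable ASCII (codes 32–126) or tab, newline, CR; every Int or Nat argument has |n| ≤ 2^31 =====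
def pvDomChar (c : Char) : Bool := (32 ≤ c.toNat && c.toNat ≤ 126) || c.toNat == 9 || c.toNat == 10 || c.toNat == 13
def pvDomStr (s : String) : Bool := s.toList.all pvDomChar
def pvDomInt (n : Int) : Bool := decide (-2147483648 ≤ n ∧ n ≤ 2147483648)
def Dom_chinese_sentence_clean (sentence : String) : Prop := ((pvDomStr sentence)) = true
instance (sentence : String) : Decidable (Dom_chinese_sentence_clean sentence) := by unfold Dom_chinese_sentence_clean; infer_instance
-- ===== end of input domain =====

-- B abandons A's split-into-words / rebuild-word-list / join / strip-leading-space
-- pipeline: it makes one character-level pass that copies every non-space character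
-- and keeps or drops each space from its two neighbouring characters alone;
-- objective: alternative.

-- ===== PORT A =====
-- is_english_alphabet_char on a single char (the len>1 AssertionError is unreachable:
-- A only calls it on word[0] / word[-1])
def pvIsEngA (c : Char) : Bool := ('a' ≤ c && c ≤ 'z') || ('A' ≤ c && c ≤ 'Z')

-- word[0] / word[-1] raise IndexError on an empty word (excluded by Pre_); there the
-- port substitutes ' ', a value A never computes with.
def chinese_sentence_clean (sentence : String) : String :=
  let words := PySem.Chars.splitOn sentence.toList [' ']
  let st := words.foldl (fun (st : List (List Char) × Bool) w =>
      let c0 := (PySem.Chars.pyGet? w 0).getD ' '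
      let m := if c0 = ',' || c0 = '\'' || c0 = '?' || c0 = '.' then st.1 ++ [w]
               else if st.2 || pvIsEngA c0 then st.1 ++ [' ' :: w]
               else st.1 ++ [w]
      (m, pvIsEngA ((PySem.Chars.pyGet? w (-1)).getD ' '))) ([], false)
  let r := PySem.Chars.join [] st.1
  -- result[0] raises on an empty result (only reachable outside Pre_); r[1:] = drop 1
  let r := if PySem.Chars.pyGet? r 0 = some ' ' then r.drop 1 else r
  String.ofList r

-- ===== PORT B =====
-- Source B's is_eng, applied to prev/nxt which are one char or '' (ported as Option Char,
-- none = ''; 'a' <= '' is False in Python, so none ↦ false — exact)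
def pvEngB : Option Char → Bool
  | none => false
  | some c => ('a' ≤ c && c ≤ 'z') || ('A' ≤ c && c ≤ 'Z')

-- Source B's indexed loop, as the obvious structural recursion over the remaining
-- characters threading prev; "sentence[i+1] if i+1 < len(sentence) else ''" is
-- exactly the head? of the remaining characters
def pvAltGo (prev : Option Char) : List Char → List Char
  | [] => []
  | c :: rest =>
    if c ≠ ' ' then c :: pvAltGo (some c) rest
    else
      match rest.head? with
      | none => pvAltGo (some c) rest
      | some n =>
        if !(n = ',' || n = '\'' || n = '?' || n = '.') && (pvEngB prev || pvEngB (some n))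
        then c :: pvAltGo (some c) rest
        else pvAltGo (some c) rest

def chinese_sentence_clean_alt (sentence : String) : String :=
  String.ofList (pvAltGo none sentence.toList)

-- ===== PRECONDITION & SPEC =====
-- Pre_ excludes exactly the inputs where A raises IndexError (an empty piece of
-- sentence.split(" "): empty sentence, leading/trailing/double space); B returns there.
def Pre_chinese_sentence_clean (sentence : String) : Prop :=
  ∀ w ∈ PySem.Chars.splitOn sentence.toList [' '], w ≠ []
instance (sentence : String) : Decidable (Pre_chinese_sentence_clean sentence) := by
  unfold Pre_chinese_sentence_clean; infer_instance
def pvWitness_chinese_sentence_clean : String := "say, Hi 7 ok a?"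

def Spec_chinese_sentence_clean (sentence : String) (out : String) : Prop := out = chinese_sentence_clean_alt sentence
instance (sentence : String) (out : String) : Decidable (Spec_chinese_sentence_clean sentence out) := by unfold Spec_chinese_sentence_clean; infer_instance

-- ===== CLAIM (what is proved, stated in full; the proofs are below) =====
def Claim_equal_chinese_sentence_clean : Prop := ∀ (sentence : String), Dom_chinese_sentence_clean sentence → Pre_chinese_sentence_clean sentence → Spec_chinese_sentence_clean sentence (chinese_sentence_clean sentence)

-- ===== LEMMAS AND PROOFS =====

-- the word-wise spacing decision both programs implement, threading the
-- "previous word ends in an English letter" flag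
def pvGo (b : Bool) : List (List Char) → List Char
  | [] => []
  | w :: ws =>
    let c0 := (PySem.Chars.pyGet? w 0).getD ' '
    (if c0 = ',' || c0 = '\'' || c0 = '?' || c0 = '.' then w
     else if b || pvIsEngA c0 then ' ' :: w else w) ++
      pvGo (pvIsEngA ((PySem.Chars.pyGet? w (-1)).getD ' ')) ws

-- a structural recursion computing split(" ") : (first piece, later pieces)
def pvSplit : List Char → List Char × List (List Char)
  | [] => ([], [])
  | c :: rest =>
    let p := pvSplit rest
    if c = ' ' then ([], p.1 :: p.2) else (c :: p.1, p.2)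

def pvGlue (ws : List (List Char)) : List Char := (ws.map (fun w => ' ' :: w)).flatten

def pvLastO (prev : Option Char) (w : List Char) : Option Char :=
  match w.getLast? with | none => prev | some c => some c

lemma pvJoin_nil_eq_flatten (ps : List (List Char)) :
    PySem.Chars.join [] ps = ps.flatten := by
  induction ps with
  | nil => rfl
  | cons p t ih =>
    cases t with
    | nil => simp [PySem.Chars.join, List.intercalate, List.intersperse]
    | cons q u =>
      simp only [PySem.Chars.join, List.intercalate, List.intersperse] at *
      simp [ih]

-- A's fold computes pvGo
lemma pvFoldA (ws : List (List Char)) : ∀ (acc : List (List Char)) (b : Bool),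
    (ws.foldl (fun (st : List (List Char) × Bool) w =>
      let c0 := (PySem.Chars.pyGet? w 0).getD ' '
      let m := if c0 = ',' || c0 = '\'' || c0 = '?' || c0 = '.' then st.1 ++ [w]
               else if st.2 || pvIsEngA c0 then st.1 ++ [' ' :: w]
               else st.1 ++ [w]
      (m, pvIsEngA ((PySem.Chars.pyGet? w (-1)).getD ' '))) (acc, b)).1.flatten
      = acc.flatten ++ pvGo b ws := by
  induction ws with
  | nil => intro acc b; simp [pvGo]
  | cons w tl ih =>
    intro acc b
    simp only [List.foldl_cons]
    rw [ih]
    simp only [pvGo]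
    split_ifs <;> simp

-- splitOn … [' '] is pvSplit
lemma pvSplitGo_eq : ∀ (fuel : Nat) (l cur : List Char) (acc : List (List Char)),
    l.length < fuel →
    PySem.Chars.splitOn.go [' '] fuel l cur acc
      = acc.reverse ++ (cur.reverse ++ (pvSplit l).1) :: (pvSplit l).2 := by
  intro fuel
  induction fuel with
  | zero => intro l cur acc h; omega
  | succ n ih =>
    intro l cur acc hlen
    cases l with
    | nil => simp [PySem.Chars.splitOn.go, pvSplit]
    | cons c rest =>
      have hlen' : rest.length < n := by simp at hlen; omega
      simp only [PySem.Chars.splitOn.go]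
      by_cases hc : c = ' '
      · subst hc
        rw [if_pos (by simp [List.isPrefixOf])]
        simp only [List.length_cons, List.length_nil, List.drop_succ_cons, List.drop_zero]
        rw [ih _ _ _ hlen']
        simp [pvSplit]
      · rw [if_neg (by simp [List.isPrefixOf]; exact fun h => hc h.symm)]
        rw [ih _ _ _ hlen']
        simp [pvSplit, hc]

lemma pvSplitOn_eq (cs : List Char) :
    PySem.Chars.splitOn cs [' '] = (pvSplit cs).1 :: (pvSplit cs).2 := by
  have := pvSplitGo_eq (cs.length + 1) cs [] [] (by omega)
  simpa [PySem.Chars.splitOn] using this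

-- pieces of pvSplit contain no space
lemma pvSplit_no_space (cs : List Char) :
    (' ' ∉ (pvSplit cs).1) ∧ ∀ w ∈ (pvSplit cs).2, ' ' ∉ w := by
  induction cs with
  | nil => simp [pvSplit]
  | cons c rest ih =>
    by_cases hc : c = ' '
    · subst hc
      refine ⟨by simp [pvSplit], ?_⟩
      intro w hw
      simp only [pvSplit] at hw
      rcases List.mem_cons.mp hw with h | h
      · exact h ▸ ih.1
      · exact ih.2 w h
    · constructor
      · simp only [pvSplit, if_neg hc]
        intro h
        rcases List.mem_cons.mp h with h | h
        · exact hc h.symm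
        · exact ih.1 h
      · intro w hw
        simp only [pvSplit, if_neg hc] at hw
        exact ih.2 w hw

-- the sentence is recovered from its pieces
lemma pvSplit_recon (cs : List Char) :
    cs = (pvSplit cs).1 ++ pvGlue (pvSplit cs).2 := by
  induction cs with
  | nil => simp [pvSplit, pvGlue]
  | cons c rest ih =>
    by_cases hc : c = ' '
    · subst hc
      simp only [pvSplit, pvGlue]
      simpa [pvGlue] using ih
    · simp only [pvSplit, if_neg hc, List.cons_append]
      exact congrArg (c :: ·) ih

lemma pyGet_zero_cons (c : Char) (w : List Char) :
    PySem.List.pyGet? (c :: w) 0 = some c := by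
  simp [PySem.List.pyGet?, PySem.List.pyIdx?]

lemma pyGet_neg_one (w : List Char) (h : w ≠ []) :
    PySem.List.pyGet? w (-1) = w.getLast? := by
  have hn : 1 ≤ w.length := List.length_pos_of_ne_nil h
  simp only [PySem.List.pyGet?, PySem.List.pyIdx?]
  rw [if_neg (by omega), if_pos (by omega)]
  simp [List.getLast?_eq_getElem?]

lemma pvLastO_cons (prev : Option Char) (c : Char) (w : List Char) :
    pvLastO prev (c :: w) = pvLastO (some c) w := by
  cases w with
  | nil => simp [pvLastO]
  | cons d t =>
    obtain ⟨x, hx⟩ : ∃ x, (d :: t).getLast? = some x := ⟨_, List.getLast?_eq_getLast (by simp)⟩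
    simp [pvLastO, List.getLast?_cons_cons, hx]

lemma pvGo_cons (b : Bool) (c0 : Char) (w' : List Char) (tl : List (List Char))
    (lc : Char) (hlc : (c0 :: w').getLast? = some lc) :
    pvGo b ((c0 :: w') :: tl)
      = (if (c0 = ',' || c0 = '\'' || c0 = '?' || c0 = '.') then c0 :: w'
         else if b || pvIsEngA c0 then ' ' :: c0 :: w' else c0 :: w')
        ++ pvGo (pvIsEngA lc) tl := by
  simp only [pvGo, PySem.Chars.pyGet?_eq_listPyGet?, pyGet_zero_cons, Option.getD_some]
  rw [pyGet_neg_one _ (by simp), hlc, Option.getD_some]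

lemma pvAltGo_space (p : Option Char) (c0 : Char) (rest : List Char) :
    pvAltGo p (' ' :: c0 :: rest)
      = (if !(c0 = ',' || c0 = '\'' || c0 = '?' || c0 = '.') && (pvEngB p || pvEngB (some c0))
         then [' '] else []) ++ pvAltGo (some ' ') (c0 :: rest) := by
  conv_lhs => rw [pvAltGo]
  rw [if_neg (by simp), List.head?_cons]
  show (if (!(c0 = ',' || c0 = '\'' || c0 = '?' || c0 = '.') && (pvEngB p || pvEngB (some c0))) = true
        then ' ' :: pvAltGo (some ' ') (c0 :: rest) else pvAltGo (some ' ') (c0 :: rest)) = _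
  by_cases hB : (!(c0 = ',' || c0 = '\'' || c0 = '?' || c0 = '.') && (pvEngB p || pvEngB (some c0))) = true
  · rw [if_pos hB, if_pos hB]; rfl
  · rw [if_neg hB, if_neg hB]; rfl

-- B copies a space-free block verbatim, updating prev to its last char
lemma pvAltGo_copy (w : List Char) : ∀ (prev : Option Char) (rest : List Char),
    ' ' ∉ w → pvAltGo prev (w ++ rest) = w ++ pvAltGo (pvLastO prev w) rest := by
  induction w with
  | nil => intro prev rest _; simp [pvLastO]
  | cons c w' ih =>
    intro prev rest hw
    have hc : c ≠ ' ' := fun h => hw (h ▸ List.mem_cons_self)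
    have hw' : ' ' ∉ w' := fun h => hw (List.mem_cons_of_mem _ h)
    simp only [List.cons_append, pvAltGo, if_pos hc]
    rw [ih _ _ hw', pvLastO_cons]

-- on the glued tail words, B computes exactly pvGo
lemma pvAltGo_glue (ws : List (List Char)) :
    ∀ (p : Char), (∀ w ∈ ws, w ≠ [] ∧ ' ' ∉ w) →
    pvAltGo (some p) (pvGlue ws) = pvGo (pvIsEngA p) ws := by
  induction ws with
  | nil => intro p _; simp [pvGlue, pvGo, pvAltGo]
  | cons w tl ih =>
    intro p hws
    obtain ⟨hne, hsp⟩ := hws w List.mem_cons_self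
    have htl : ∀ v ∈ tl, v ≠ [] ∧ ' ' ∉ v := fun v hv => hws v (List.mem_cons_of_mem _ hv)
    obtain ⟨c0, w', rfl⟩ := List.exists_cons_of_ne_nil hne
    have hc0 : c0 ≠ ' ' := fun h => hsp (h ▸ List.mem_cons_self)
    -- last char of the word
    obtain ⟨lc, hlc⟩ : ∃ lc, (c0 :: w').getLast? = some lc := ⟨_, List.getLast?_eq_getLast (by simp)⟩
    have hcopy : pvAltGo (some ' ') ((c0 :: w') ++ pvGlue tl)
        = (c0 :: w') ++ pvGo (pvIsEngA lc) tl := by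
      rw [pvAltGo_copy _ _ _ hsp]
      have : pvLastO (some ' ') (c0 :: w') = some lc := by simp [pvLastO, hlc]
      rw [this, ih lc htl]
    have hglue : pvGlue ((c0 :: w') :: tl) = ' ' :: (c0 :: (w' ++ pvGlue tl)) := rfl
    rw [hglue, pvAltGo_space, pvGo_cons _ _ _ _ _ hlc]
    have hcopy' : pvAltGo (some ' ') (c0 :: (w' ++ pvGlue tl)) = (c0 :: w') ++ pvGo (pvIsEngA lc) tl := by
      simpa using hcopy
    rw [hcopy']
    have hpe : pvEngB (some p) = pvIsEngA p := rfl
    have hce : pvEngB (some c0) = pvIsEngA c0 := rfl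
    rw [hpe, hce]
    by_cases h1 : (c0 = ',' || c0 = '\'' || c0 = '?' || c0 = '.') = true
    · rw [if_pos h1]
      rw [show (!(c0 = ',' || c0 = '\'' || c0 = '?' || c0 = '.') && (pvIsEngA p || pvIsEngA c0)) = false by simp [h1]]
      simp
    · rw [if_neg h1]
      rw [show (!(c0 = ',' || c0 = '\'' || c0 = '?' || c0 = '.') && (pvIsEngA p || pvIsEngA c0)) = (pvIsEngA p || pvIsEngA c0) by simp at h1; simp [h1]]
      by_cases h2 : (pvIsEngA p || pvIsEngA c0) = true
      · rw [if_pos h2, if_pos h2]; simp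
      · rw [if_neg h2, if_neg h2]; simp

-- ===== VERDICT (by name: the statement is the Claim_ definition above) =====
theorem chinese_sentence_clean_spec : Claim_equal_chinese_sentence_clean := by
  intro sentence _ hpre
  unfold Spec_chinese_sentence_clean
  unfold chinese_sentence_clean chinese_sentence_clean_alt
  simp only []
  rw [pvJoin_nil_eq_flatten, pvFoldA]
  unfold Pre_chinese_sentence_clean at hpre
  rw [pvSplitOn_eq] at hpre ⊢
  -- name the pieces
  set w := (pvSplit sentence.toList).1 with hw
  set ws := (pvSplit sentence.toList).2 with hws
  have hwne : w ≠ [] := hpre w List.mem_cons_self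
  have hsp := pvSplit_no_space sentence.toList
  rw [← hw, ← hws] at hsp
  obtain ⟨c0, w', hwc⟩ := List.exists_cons_of_ne_nil hwne
  have hc0 : c0 ≠ ' ' := by
    intro h; exact hsp.1 (hwc ▸ h ▸ List.mem_cons_self)
  have hwsok : ∀ v ∈ ws, v ≠ [] ∧ ' ' ∉ v :=
    fun v hv => ⟨hpre v (List.mem_cons_of_mem _ hv), hsp.2 v hv⟩
  -- B side: decompose the sentence
  have hrecon : sentence.toList = w ++ pvGlue ws := pvSplit_recon sentence.toList
  obtain ⟨lc, hlc⟩ : ∃ lc, w.getLast? = some lc :=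
    ⟨_, List.getLast?_eq_getLast hwne⟩
  have hB : pvAltGo none sentence.toList = w ++ pvGo (pvIsEngA lc) ws := by
    rw [hrecon, pvAltGo_copy _ _ _ hsp.1]
    have : pvLastO none w = some lc := by simp [pvLastO, hlc]
    rw [this, pvAltGo_glue _ _ hwsok]
  -- A side: one step of pvGo on the first word, then the strip
  rw [hB]
  simp only [List.flatten_nil, List.nil_append]
  rw [hwc] at hlc ⊢
  rw [pvGo_cons _ _ _ _ _ hlc]
  by_cases h1 : (c0 = ',' || c0 = '\'' || c0 = '?' || c0 = '.') = true
  · rw [if_pos h1]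
    simp only [List.cons_append]
    rw [if_neg (by simp only [PySem.Chars.pyGet?_eq_listPyGet?, pyGet_zero_cons]; simp [hc0])]
  · rw [if_neg h1]
    by_cases h2 : (false || pvIsEngA c0) = true
    · rw [if_pos h2]
      simp only [List.cons_append]
      rw [if_pos (by simp only [PySem.Chars.pyGet?_eq_listPyGet?, pyGet_zero_cons])]
      rw [List.drop_one, List.tail_cons]
    · rw [if_neg h2]
      simp only [List.cons_append]
      rw [if_neg (by simp only [PySem.Chars.pyGet?_eq_listPyGet?, pyGet_zero_cons]; simp [hc0])]
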